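-- pv_equiv track=rewrite | github.com/TBates90/pgrid | build/lib/polygrid/algorithms.py | ring_faces
-- ===== SOURCE A (Python) =====
-- from typing import Dict, Iterable, List
--
-- def ring_faces(
--     face_adjacency: Dict[str, List[str]],
--     start_face_id: str,
--     max_depth: int,
-- ) -> Dict[int, List[str]]:
--     """Return faces grouped by BFS ring distance from a start face."""
--     if max_depth < 0:
--         raise ValueError("max_depth must be >= 0")
--
--     visited = {start_face_id}
--     rings: Dict[int, List[str]] = {0: [start_face_id]}
--     frontier = [start_face_id]
--
--     for depth in range(1, max_depth + 1):
--         next_frontier: List[str] = []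
--         for face_id in frontier:
--             for neighbor in face_adjacency.get(face_id, []):
--                 if neighbor in visited:
--                     continue
--                 visited.add(neighbor)
--                 next_frontier.append(neighbor)
--         if not next_frontier:
--             break
--         rings[depth] = sorted(next_frontier)
--         frontier = next_frontier
--
--     return rings
-- ===== SOURCE B (Python) =====
-- def ring_faces(face_adjacency, start_face_id, max_depth):
--     """Single-queue BFS building a distance map, then bucket faces by distance."""
--     if max_depth < 0:
--         raise ValueError("max_depth must be >= 0")
--     dist = {start_face_id: 0}
--     queue = [(start_face_id, 0)]
--     while queue:
--         face_id, d = queue.pop(0)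
--         for neighbor in face_adjacency.get(face_id, []):
--             if neighbor not in dist and d + 1 <= max_depth:
--                 dist[neighbor] = d + 1
--                 queue.append((neighbor, d + 1))
--     buckets = {}
--     for face_id, d in dist.items():
--         buckets[d] = buckets.get(d, []) + [face_id]
--     return {d: sorted(buckets[d]) for d in sorted(buckets)}
-- ===== Notes on version B (the rewrite author's own statement) =====
-- stated objective: alternative
-- what changed: Replaces A's level-by-level frontier expansion (which writes sorted rings during the traversal) by a single-queue BFS that only records a distance map, followed by a separate bucketing-and-sorting pass grouping faces by recorded distance.
import Mathlib
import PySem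

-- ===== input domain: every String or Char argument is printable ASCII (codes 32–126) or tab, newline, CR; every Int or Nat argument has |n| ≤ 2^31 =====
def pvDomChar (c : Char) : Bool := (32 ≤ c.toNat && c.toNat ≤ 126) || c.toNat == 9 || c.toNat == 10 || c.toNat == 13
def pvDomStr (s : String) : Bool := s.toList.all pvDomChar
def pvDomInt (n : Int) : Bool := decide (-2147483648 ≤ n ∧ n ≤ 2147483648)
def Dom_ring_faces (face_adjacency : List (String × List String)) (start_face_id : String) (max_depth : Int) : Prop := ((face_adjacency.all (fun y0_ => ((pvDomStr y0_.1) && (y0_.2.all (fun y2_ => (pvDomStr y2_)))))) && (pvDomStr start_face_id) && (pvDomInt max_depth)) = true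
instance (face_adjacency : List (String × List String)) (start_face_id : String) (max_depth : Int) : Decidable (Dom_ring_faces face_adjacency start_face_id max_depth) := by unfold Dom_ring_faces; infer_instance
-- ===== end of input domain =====

-- B replaces A's level-by-level frontier expansion by a single-queue BFS that records a
-- distance map and then buckets faces by distance (alternative decomposition, same cost).

-- ===== PORT A =====
-- face_adjacency.get(face_id, [])
def pvAdjGet (g : List (String × List String)) (f : String) : List String :=
  (PySem.Dict.mk g).getD f []

-- A's innermost loop body: skip visited neighbours, else add to visited and next_frontier
def pvVisitStep (st : List String × List String) (n : String) : List String × List String :=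
  if n ∈ st.1 then st else (PySem.Set.add st.1 n, st.2 ++ [n])

-- A's two inner loops over the frontier, state = (visited, next_frontier)
def pvLevelStep (g : List (String × List String)) (st : List String × List String)
    (frontier : List String) : List String × List String :=
  frontier.foldl (fun st f => (pvAdjGet g f).foldl pvVisitStep st) st

-- A's 'for depth in range(1, max_depth+1)' loop with its early break,
-- as a counted recursion: n depths remain, 'depth' is the current one
def pvLoopA (g : List (String × List String)) :
    Nat → Int → List String → PySem.Dict Int (List String) → List String →
    PySem.Dict Int (List String)
  | 0, _, _, rings, _ => rings
  | n + 1, depth, visited, rings, frontier =>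
    let st := pvLevelStep g (visited, []) frontier
    if st.2 = [] then rings
    else pvLoopA g n (depth + 1) st.1
      (rings.insert depth (PySem.List.sorted st.2 (fun x => x) false)) st.2

def ring_faces (face_adjacency : List (String × List String)) (start_face_id : String) (max_depth : Int) : List (Int × List String) :=
  if max_depth < 0 then []  -- Python raises ValueError here; excluded by Pre_ring_faces
  else (pvLoopA face_adjacency max_depth.toNat 1
          (PySem.Set.ofList [start_face_id])
          (PySem.Dict.mk [((0 : Int), [start_face_id])])
          [start_face_id]).items

-- ===== PORT B =====
-- B's inner neighbour loop body: record dist[n] = d+1 and enqueue when new and within depth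
def pvBfsStep (md d : Int) (st : PySem.Dict String Int × List (String × Int)) (n : String) :
    PySem.Dict String Int × List (String × Int) :=
  if st.1.contains n = false ∧ d + 1 ≤ md then (st.1.insert n (d + 1), st.2 ++ [(n, d + 1)]) else st

-- B's 'while queue' loop; fuel only makes the recursion structural (unreachable at the
-- fuel ring_faces_alt supplies, as the equivalence proof shows)
def pvBfs (g : List (String × List String)) (md : Int) (fuel : Nat)
    (queue : List (String × Int)) (dist : PySem.Dict String Int) : PySem.Dict String Int :=
  match queue with
  | [] => dist
  | (face, d) :: rest =>
    match fuel with
    | 0 => dist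
    | fuel' + 1 =>
      let st := (pvAdjGet g face).foldl (pvBfsStep md d) (dist, [])
      pvBfs g md fuel' (rest ++ st.2) st.1

def ring_faces_alt (face_adjacency : List (String × List String)) (start_face_id : String) (max_depth : Int) : List (Int × List String) :=
  if max_depth < 0 then []  -- Python raises ValueError here; excluded by Pre_ring_faces
  else
    let dist := pvBfs face_adjacency max_depth ((face_adjacency.map (fun p => p.2.length)).sum + 1)
      [(start_face_id, 0)] (PySem.Dict.mk [(start_face_id, (0 : Int))])
    let buckets := dist.items.foldl
      (fun (b : PySem.Dict Int (List String)) p => b.modify p.2 [] (fun l => l ++ [p.1]))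
      PySem.Dict.empty
    (PySem.List.sorted buckets.keys (fun x => x) false).map
      (fun d => (d, PySem.List.sorted (buckets.getD d []) (fun x => x) false))

-- ===== PRECONDITION & SPEC =====
-- Python A raises ValueError exactly when max_depth < 0; those inputs are excluded.
def Pre_ring_faces (face_adjacency : List (String × List String)) (start_face_id : String) (max_depth : Int) : Prop := 0 ≤ max_depth
instance (face_adjacency : List (String × List String)) (start_face_id : String) (max_depth : Int) : Decidable (Pre_ring_faces face_adjacency start_face_id max_depth) := by unfold Pre_ring_faces; infer_instance

def pvWitness_ring_faces : (List (String × List String)) × String × Int :=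
  ([("a", ["b"]), ("b", ["a", "c"]), ("c", [])], "a", 2)

def Spec_ring_faces (face_adjacency : List (String × List String)) (start_face_id : String) (max_depth : Int) (out : List (Int × List String)) : Prop := out = ring_faces_alt face_adjacency start_face_id max_depth
instance (face_adjacency : List (String × List String)) (start_face_id : String) (max_depth : Int) (out : List (Int × List String)) : Decidable (Spec_ring_faces face_adjacency start_face_id max_depth out) := by unfold Spec_ring_faces; infer_instance

-- ===== CLAIM (what is proved, stated in full; the proofs are below) =====
def Claim_equal_ring_faces : Prop := ∀ (face_adjacency : List (String × List String)) (start_face_id : String) (max_depth : Int), Dom_ring_faces face_adjacency start_face_id max_depth → Pre_ring_faces face_adjacency start_face_id max_depth → Spec_ring_faces face_adjacency start_face_id max_depth (ring_faces face_adjacency start_face_id max_depth)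

-- ===== LEMMAS AND PROOFS =====

-- all candidate neighbours of the graph
def pvCands (g : List (String × List String)) : List String := g.flatMap (fun p => p.2)

-- number of candidates not yet in dist: bounds the number of future enqueues
def pvPot (g : List (String × List String)) (dist : PySem.Dict String Int) : Nat :=
  ((pvCands g).filter (fun x => !dist.contains x)).length

-- B's dist keys are exactly A's visited set
def pvCouple (dist : PySem.Dict String Int) (V : List String) : Prop :=
  ∀ x, dist.contains x = true ↔ x ∈ V

-- A's sequence of (depth, next_frontier) levels
def pvLevels (g : List (String × List String)) :
    Nat → Int → List String → List String → List (Int × List String)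
  | 0, _, _, _ => []
  | n + 1, d, V, F =>
    let st := pvLevelStep g (V, []) F
    if st.2 = [] then [] else (d + 1, st.2) :: pvLevels g n (d + 1) st.1 st.2

lemma pvAdjGet_sub (g : List (String × List String)) (f : String) :
    ∀ x ∈ pvAdjGet g f, x ∈ pvCands g := by
  intro x hx
  unfold pvAdjGet PySem.Dict.getD PySem.Dict.get? at hx
  cases hfind : List.find? (fun p => p.1 == f) (PySem.Dict.mk g).items with
  | none => rw [hfind] at hx; simp at hx
  | some pr =>
    rw [hfind] at hx
    simp at hx
    exact List.mem_flatMap.2 ⟨pr, List.mem_of_find?_eq_some hfind, hx⟩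

lemma pvInnerA_acc (ns : List String) (V nf : List String) :
    ns.foldl pvVisitStep (V, nf)
      = ((ns.foldl pvVisitStep (V, [])).1, nf ++ (ns.foldl pvVisitStep (V, [])).2) := by
  induction ns generalizing V nf with
  | nil => simp
  | cons n ns ih =>
    simp only [List.foldl_cons, pvVisitStep]
    by_cases h : n ∈ V
    · simp only [if_pos h]
      exact ih V nf
    · simp only [if_neg h]
      rw [ih (PySem.Set.add V n) (nf ++ [n]), ih (PySem.Set.add V n) ([] ++ [n])]
      simp

lemma pvLevelStep_acc (g : List (String × List String)) (F : List String) (V nf : List String) :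
    pvLevelStep g (V, nf) F
      = ((pvLevelStep g (V, []) F).1, nf ++ (pvLevelStep g (V, []) F).2) := by
  induction F generalizing V nf with
  | nil => simp [pvLevelStep]
  | cons f F ih =>
    have hcons : ∀ st : List String × List String,
        pvLevelStep g st (f :: F) = pvLevelStep g ((pvAdjGet g f).foldl pvVisitStep st) F := by
      intro st; simp [pvLevelStep]
    rw [hcons, hcons, pvInnerA_acc (pvAdjGet g f) V nf]
    generalize List.foldl pvVisitStep (V, []) (pvAdjGet g f) = P
    obtain ⟨a, b⟩ := P
    dsimp only
    rw [ih, ih]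
    simp [ih a b]

lemma pvFilter_length_lt {α : Type} (l : List α) (p p' : α → Bool)
    (himp : ∀ x, p' x = true → p x = true) (n : α) (hn : n ∈ l) (hp : p n = true)
    (hp' : p' n = false) : (l.filter p').length < (l.filter p).length := by
  induction l with
  | nil => cases hn
  | cons a l ih =>
    rcases List.mem_cons.1 hn with h | ha
    · subst h
      rw [List.filter_cons_of_pos hp, List.filter_cons_of_neg (by simp [hp'])]
      have hle : (l.filter p').length ≤ (l.filter p).length :=
        (List.monotone_filter_right l himp).length_le
      simp only [List.length_cons]
      omega
    · by_cases h1 : p' a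
      · rw [List.filter_cons_of_pos h1, List.filter_cons_of_pos (himp a h1)]
        simpa using ih ha
      · rw [List.filter_cons_of_neg (by simp [h1])]
        by_cases h2 : p a
        · rw [List.filter_cons_of_pos h2]
          exact Nat.lt_succ_of_lt (ih ha)
        · rw [List.filter_cons_of_neg (by simp [h2])]
          exact ih ha

lemma pvPot_insert (g : List (String × List String)) (dist : PySem.Dict String Int)
    (n : String) (v : Int) (hc : n ∈ pvCands g) (hn : dist.contains n = false) :
    pvPot g (dist.insert n v) + 1 ≤ pvPot g dist := by
  unfold pvPot
  have hco : (pvCands g).filter (fun x => !(dist.insert n v).contains x)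
      = (pvCands g).filter (fun x => !(x == n || dist.contains x)) := by
    apply List.filter_congr
    intro x _
    rw [PySem.Dict.contains_insert]
  rw [hco]
  have hlt := pvFilter_length_lt (pvCands g) (fun x => !dist.contains x)
    (fun x => !(x == n || dist.contains x))
    (by intro x hx; simp at hx ⊢; exact hx.2) n hc (by simp [hn]) (by simp)
  omega

lemma pvInnerB_corr (g : List (String × List String)) (md d : Int) (hd : d + 1 ≤ md) :
    ∀ (ns : List String) (dist : PySem.Dict String Int) (V nf : List String)
      (q : List (String × Int)), pvCouple dist V →
    ∃ delta : List String,
      (ns.foldl pvVisitStep (V, nf)).2 = nf ++ delta ∧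
      (ns.foldl (pvBfsStep md d) (dist, q)).2 = q ++ delta.map (fun x => (x, d + 1)) ∧
      pvCouple (ns.foldl (pvBfsStep md d) (dist, q)).1 (ns.foldl pvVisitStep (V, nf)).1 ∧
      (ns.foldl (pvBfsStep md d) (dist, q)).1.items
        = dist.items ++ delta.map (fun x => (x, d + 1)) ∧
      ((∀ x ∈ ns, x ∈ pvCands g) →
        delta.length + pvPot g (ns.foldl (pvBfsStep md d) (dist, q)).1 ≤ pvPot g dist) := by
  intro ns
  induction ns with
  | nil =>
    intro dist V nf q hc
    exact ⟨[], by simp, by simp, hc, by simp, by simp⟩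
  | cons n ns ih =>
    intro dist V nf q hc
    by_cases h : n ∈ V
    · have hcon : dist.contains n = true := (hc n).2 h
      have hB : pvBfsStep md d (dist, q) n = (dist, q) := by
        simp [pvBfsStep, hcon]
      have hA : pvVisitStep (V, nf) n = (V, nf) := by
        simp [pvVisitStep, h]
      simp only [List.foldl_cons, hB, hA]
      obtain ⟨delta, h1, h2, h3, h4, h5⟩ := ih dist V nf q hc
      exact ⟨delta, h1, h2, h3, h4, fun hsub => h5 (fun x hx => hsub x (by simp [hx]))⟩
    · have hcon : dist.contains n = false := by
        cases hcb : dist.contains n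
        · rfl
        · exact absurd ((hc n).1 hcb) h
      have hB : pvBfsStep md d (dist, q) n = (dist.insert n (d + 1), q ++ [(n, d + 1)]) := by
        simp [pvBfsStep, hcon, hd]
      have hA : pvVisitStep (V, nf) n = (V ++ [n], nf ++ [n]) := by
        simp only [pvVisitStep, if_neg h]
        have : PySem.Set.add V n = V ++ [n] := by simp [PySem.Set.add, h]
        rw [this]
      have hc' : pvCouple (dist.insert n (d + 1)) (V ++ [n]) := by
        intro x
        rw [PySem.Dict.contains_insert]
        constructor
        · intro hx
          rcases Bool.or_eq_true_iff.1 hx with hx | hx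
          · simp at hx; simp [hx]
          · simp [(hc x).1 hx]
        · intro hx
          rcases List.mem_append.1 hx with hx | hx
          · simp [(hc x).2 hx]
          · simp at hx; simp [hx]
      simp only [List.foldl_cons, hB, hA]
      obtain ⟨delta, h1, h2, h3, h4, h5⟩ :=
        ih (dist.insert n (d + 1)) (V ++ [n]) (nf ++ [n]) (q ++ [(n, d + 1)]) hc'
      refine ⟨n :: delta, ?_, ?_, h3, ?_, ?_⟩
      · rw [h1]; simp
      · rw [h2]; simp
      · rw [h4, PySem.Dict.items_insert_of_not_contains dist _ hcon]; simp
      · intro hsub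
        have hpot := pvPot_insert g dist n (d + 1) (hsub n (by simp)) hcon
        have h5' := h5 (fun x hx => hsub x (by simp [hx]))
        simp only [List.length_cons]
        omega

lemma pvInnerB_noop (md d : Int) (hd : ¬ d + 1 ≤ md) (ns : List String)
    (dist : PySem.Dict String Int) :
    ns.foldl (pvBfsStep md d) (dist, []) = (dist, []) := by
  have hstep : ∀ st n, pvBfsStep md d st n = st := by
    intro st n
    simp [pvBfsStep, hd]
  induction ns with
  | nil => rfl
  | cons a l ih => simp [List.foldl_cons, hstep, ih]

lemma pvBfs_drain (g : List (String × List String)) (md : Int) :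
    ∀ (q : List (String × Int)) (dist : PySem.Dict String Int) (fuel : Nat),
      (∀ p ∈ q, ¬ p.2 + 1 ≤ md) → pvBfs g md (q.length + fuel) q dist = dist := by
  intro q
  induction q with
  | nil => intro dist fuel _; simp [pvBfs]
  | cons p rest ih =>
    intro dist fuel hq
    obtain ⟨face, d⟩ := p
    have hlen : ((face, d) :: rest).length + fuel = (rest.length + fuel) + 1 := by
      simp [List.length_cons]; omega
    rw [hlen]
    simp only [pvBfs, pvInnerB_noop md d (hq (face, d) (by simp)) (pvAdjGet g face) dist]
    simpa using ih dist fuel (fun p hp => hq p (List.mem_cons_of_mem _ hp))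

lemma pvBfs_level (g : List (String × List String)) (md d : Int) (hd : d + 1 ≤ md) :
    ∀ (F : List String) (V NF : List String) (dist : PySem.Dict String Int) (fuel : Nat),
      pvCouple dist V →
    ∃ dist' : PySem.Dict String Int,
      pvBfs g md (F.length + fuel)
          (F.map (fun x => (x, d)) ++ NF.map (fun x => (x, d + 1))) dist
        = pvBfs g md fuel ((NF ++ (pvLevelStep g (V, []) F).2).map (fun x => (x, d + 1))) dist' ∧
      pvCouple dist' (pvLevelStep g (V, []) F).1 ∧
      dist'.items = dist.items ++ (pvLevelStep g (V, []) F).2.map (fun x => (x, d + 1)) ∧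
      (pvLevelStep g (V, []) F).2.length + pvPot g dist' ≤ pvPot g dist := by
  intro F
  induction F with
  | nil =>
    intro V NF dist fuel hc
    refine ⟨dist, by simp [pvLevelStep], by simpa [pvLevelStep] using hc,
      by simp [pvLevelStep], by simp [pvLevelStep]⟩
  | cons f F ihF =>
    intro V NF dist fuel hc
    obtain ⟨delta, h1, h2, h3, h4, h5⟩ :=
      pvInnerB_corr g md d hd (pvAdjGet g f) dist V [] [] hc
    have hdelta : delta = (List.foldl pvVisitStep (V, []) (pvAdjGet g f)).2 := by
      simpa using h1.symm
    subst hdelta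
    have hcons : pvLevelStep g (V, []) (f :: F)
        = pvLevelStep g ((List.foldl pvVisitStep (V, []) (pvAdjGet g f)).1,
            (List.foldl pvVisitStep (V, []) (pvAdjGet g f)).2) F := rfl
    have hacc := pvLevelStep_acc g F
      (List.foldl pvVisitStep (V, []) (pvAdjGet g f)).1
      (List.foldl pvVisitStep (V, []) (pvAdjGet g f)).2
    obtain ⟨dist', g1, g2, g3, g4⟩ := ihF
      (List.foldl pvVisitStep (V, []) (pvAdjGet g f)).1
      (NF ++ (List.foldl pvVisitStep (V, []) (pvAdjGet g f)).2)
      (List.foldl (pvBfsStep md d) (dist, []) (pvAdjGet g f)).1 fuel h3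
    refine ⟨dist', ?_, ?_, ?_, ?_⟩
    · have hstep : pvBfs g md ((f :: F).length + fuel)
          ((f :: F).map (fun x => (x, d)) ++ NF.map (fun x => (x, d + 1))) dist
          = pvBfs g md (F.length + fuel)
              ((F.map (fun x => (x, d)) ++ NF.map (fun x => (x, d + 1)))
                ++ (List.foldl (pvBfsStep md d) (dist, []) (pvAdjGet g f)).2)
              (List.foldl (pvBfsStep md d) (dist, []) (pvAdjGet g f)).1 := by
        simp only [List.length_cons, List.map_cons, List.cons_append]
        rw [show F.length + 1 + fuel = (F.length + fuel) + 1 by omega]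
        rfl
      rw [hstep, h2]
      rw [show (F.map (fun x => (x, d)) ++ NF.map (fun x => (x, d + 1))) ++
            ([] ++ ((List.foldl pvVisitStep (V, []) (pvAdjGet g f)).2).map (fun x => (x, d + 1)))
          = F.map (fun x => (x, d))
              ++ (NF ++ (List.foldl pvVisitStep (V, []) (pvAdjGet g f)).2).map (fun x => (x, d + 1))
          by simp [List.map_append]]
      rw [g1, hcons, hacc]
      simp [List.append_assoc]
    · rw [hcons, hacc]
      exact g2
    · rw [hcons, hacc]
      rw [g3, h4]
      simp [List.map_append]
    · rw [hcons, hacc]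
      have h5' := h5 (pvAdjGet_sub g f)
      simp only [List.length_append]
      simp only [List.nil_append] at h5'
      omega

lemma pvBfs_main (g : List (String × List String)) (md : Int) :
    ∀ (n : Nat) (d : Int) (V F : List String) (dist : PySem.Dict String Int) (fuel : Nat),
      pvCouple dist V → md = d + n → F.length + pvPot g dist ≤ fuel →
      (pvBfs g md fuel (F.map (fun x => (x, d))) dist).items
        = dist.items
            ++ (pvLevels g n d V F).flatMap (fun p => p.2.map (fun x => (x, p.1))) := by
  intro n
  induction n with
  | zero =>
    intro d V F dist fuel hc hmd hfuel
    have hq : ∀ p ∈ F.map (fun x => (x, d)), ¬ p.2 + 1 ≤ md := by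
      intro p hp
      obtain ⟨x, hx, rfl⟩ := List.mem_map.1 hp
      push_cast at hmd
      simp
      omega
    have hfe : fuel = (F.map (fun x => (x, d))).length + (fuel - F.length) := by
      simp [List.length_map]
      omega
    rw [hfe, pvBfs_drain g md (F.map (fun x => (x, d))) dist (fuel - F.length) hq, pvLevels]
    simp
  | succ n ih =>
    intro d V F dist fuel hc hmd hfuel
    have hd : d + 1 ≤ md := by push_cast at hmd; omega
    obtain ⟨dist1, e1, e2, e3, e4⟩ := pvBfs_level g md d hd F V [] dist (fuel - F.length) hc
    have hfe : fuel = F.length + (fuel - F.length) := by omega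
    have e1' : pvBfs g md fuel (F.map (fun x => (x, d))) dist
        = pvBfs g md (fuel - F.length)
            ((pvLevelStep g (V, []) F).2.map (fun x => (x, d + 1))) dist1 := by
      rw [hfe]
      simpa using e1
    rw [e1', pvLevels]
    by_cases h : (pvLevelStep g (V, []) F).2 = []
    · rw [h] at e3
      simp only [h, if_pos]
      simp only [List.map_nil]
      simp [pvBfs]
      simpa using e3
    · simp only [h, if_neg, not_false_iff]
      rw [ih (d + 1) (pvLevelStep g (V, []) F).1 (pvLevelStep g (V, []) F).2 dist1
        (fuel - F.length) e2 (by push_cast at hmd ⊢; omega)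
        (by have := e4; omega)]
      rw [e3]
      simp [List.append_assoc]

lemma pvLevels_fst_lt (g : List (String × List String)) :
    ∀ (n : Nat) (d : Int) (V F : List String) (p : Int × List String),
      p ∈ pvLevels g n d V F → d < p.1 := by
  intro n
  induction n with
  | zero => intro d V F p hp; simp [pvLevels] at hp
  | succ n ih =>
    intro d V F p hp
    rw [pvLevels] at hp
    by_cases h : (pvLevelStep g (V, []) F).2 = []
    · simp [h] at hp
    · simp only [h, if_neg, not_false_iff] at hp
      rcases List.mem_cons.1 hp with h1 | h1
      · subst h1; simp
      · have := ih (d + 1) _ _ p h1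
        omega

lemma pvLevels_fst_pairwise (g : List (String × List String)) :
    ∀ (n : Nat) (d : Int) (V F : List String),
      (pvLevels g n d V F).Pairwise (fun p q => p.1 < q.1) := by
  intro n
  induction n with
  | zero => intro d V F; simp [pvLevels]
  | succ n ih =>
    intro d V F
    rw [pvLevels]
    by_cases h : (pvLevelStep g (V, []) F).2 = []
    · simp [h]
    · simp only [h, if_neg, not_false_iff]
      refine List.pairwise_cons.2 ⟨?_, ih (d + 1) _ _⟩
      intro p hp
      have := pvLevels_fst_lt g n (d + 1) _ _ p hp
      simpa using this

lemma pvLevels_snd_ne_nil (g : List (String × List String)) :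
    ∀ (n : Nat) (d : Int) (V F : List String) (p : Int × List String),
      p ∈ pvLevels g n d V F → p.2 ≠ [] := by
  intro n
  induction n with
  | zero => intro d V F p hp; simp [pvLevels] at hp
  | succ n ih =>
    intro d V F p hp
    rw [pvLevels] at hp
    by_cases h : (pvLevelStep g (V, []) F).2 = []
    · simp [h] at hp
    · simp only [h, if_neg, not_false_iff] at hp
      rcases List.mem_cons.1 hp with h1 | h1
      · subst h1; simpa using h
      · exact ih (d + 1) _ _ p h1

lemma pvLoopA_levels (g : List (String × List String)) :
    ∀ (n : Nat) (d : Int) (V : List String) (rings : PySem.Dict Int (List String))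
      (F : List String),
      pvLoopA g n (d + 1) V rings F
        = (pvLevels g n d V F).foldl
            (fun r p => r.insert p.1 (PySem.List.sorted p.2 (fun x => x) false)) rings := by
  intro n
  induction n with
  | zero =>
    intro d V rings F
    rw [pvLevels]
    rfl
  | succ n ih =>
    intro d V rings F
    rw [pvLoopA, pvLevels]
    by_cases h : (pvLevelStep g (V, []) F).2 = []
    · simp [h]
    · simp only [h, if_neg, not_false_iff, List.foldl_cons]
      exact ih (d + 1) _ _ _

-- folding Set.add over constant-valued groups with distinct fresh keys appends the keys
lemma pvOfList_groups (L : List (Int × List String)) :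
    ∀ (acc : List Int), (∀ p ∈ L, p.2 ≠ []) → (∀ p ∈ L, p.1 ∉ acc) →
      L.Pairwise (fun p q => p.1 ≠ q.1) →
      (L.flatMap (fun p => p.2.map (fun _ => p.1))).foldl PySem.Set.add acc
        = acc ++ L.map (fun p => p.1) := by
  induction L with
  | nil => intro acc _ _ _; simp
  | cons p L ih =>
    obtain ⟨dd, faces⟩ := p
    intro acc hne hfresh hpw
    rw [List.flatMap_cons, List.foldl_append]
    have hnoop : ∀ (l : List String) (acc' : List Int), dd ∈ acc' →
        (l.map (fun _ => dd)).foldl PySem.Set.add acc' = acc' := by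
      intro l
      induction l with
      | nil => intro acc' _; rfl
      | cons y l ihl =>
        intro acc' hmem
        have hy : PySem.Set.add acc' dd = acc' := by
          simp [PySem.Set.add, hmem]
        simp only [List.map_cons, List.foldl_cons, hy]
        exact ihl acc' hmem
    have hgrp : (faces.map (fun _ => dd)).foldl PySem.Set.add acc = acc ++ [dd] := by
      cases hf : faces with
      | nil => exact absurd (by simp [hf]) (hne (dd, faces) (by simp))
      | cons x rest =>
        rw [List.map_cons, List.foldl_cons]
        have hadd : PySem.Set.add acc dd = acc ++ [dd] := by
          have hmem : dd ∉ acc := hfresh (dd, faces) (by simp)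
          simp [PySem.Set.add, hmem]
        rw [hadd]
        exact hnoop rest (acc ++ [dd]) (by simp)
    dsimp only at hgrp ⊢
    rw [hgrp]
    rw [ih (acc ++ [dd]) (fun q hq => hne q (by simp [hq]))
        (fun q hq => by
          simp only [List.mem_append, List.mem_singleton]
          rintro (hq1 | hq1)
          · exact hfresh q (by simp [hq]) hq1
          · exact ((List.pairwise_cons.1 hpw).1 q hq).symm hq1)
        (List.pairwise_cons.1 hpw).2]
    simp

lemma pvFilter_flat_nil (L : List (Int × List String)) (c : Int)
    (h : ∀ p ∈ L, p.1 ≠ c) :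
    (L.flatMap (fun p => p.2.map (fun x => (p.1, x)))).filter (fun q => q.1 == c) = [] := by
  induction L with
  | nil => rfl
  | cons p L ih =>
    rw [List.flatMap_cons, List.filter_append]
    rw [ih (fun q hq => h q (by simp [hq]))]
    have hg : (p.2.map (fun x => (p.1, x))).filter (fun q => q.1 == c) = [] := by
      have hne : (p.1 == c) = false := by
        simpa using h p (by simp)
      simp [List.filter_map, hne]
    rw [hg]
    simp

lemma pvFilter_flat_group (L : List (Int × List String))
    (hpw : L.Pairwise (fun p q => p.1 ≠ q.1)) (p : Int × List String) (hp : p ∈ L) :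
    (L.flatMap (fun r => r.2.map (fun x => (r.1, x)))).filter (fun q => q.1 == p.1)
      = p.2.map (fun x => (p.1, x)) := by
  induction L with
  | nil => cases hp
  | cons q L ih =>
    rw [List.flatMap_cons, List.filter_append]
    rcases List.mem_cons.1 hp with h | h
    · subst h
      have h1 : (p.2.map (fun x => (p.1, x))).filter (fun r => r.1 == p.1)
          = p.2.map (fun x => (p.1, x)) := by
        simp [List.filter_map, Function.comp_def]
      have h2 := pvFilter_flat_nil L p.1
        (fun r hr => ((List.pairwise_cons.1 hpw).1 r hr).symm)
      rw [h1, h2, List.append_nil]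
    · have hq1 : (q.1 == p.1) = false := by
        simpa using (List.pairwise_cons.1 hpw).1 p h
      have h0 : (q.2.map (fun x => (q.1, x))).filter (fun r => r.1 == p.1) = [] := by
        simp [List.filter_map, hq1]
      rw [h0, List.nil_append]
      exact ih (List.pairwise_cons.1 hpw).2 h

-- ===== VERDICT (by name: the statement is the Claim_ definition above) =====
theorem ring_faces_spec : Claim_equal_ring_faces := by
  intro g s md _ hpre
  unfold Pre_ring_faces at hpre
  unfold Spec_ring_faces
  simp only [ring_faces, ring_faces_alt, if_neg (show ¬ md < 0 by omega)]
  -- facts about the level decomposition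
  have hV : PySem.Set.ofList [s] = [s] := rfl
  have hlt : ∀ p ∈ pvLevels g md.toNat 0 [s] [s], 0 < p.1 :=
    fun p hp => pvLevels_fst_lt g md.toNat 0 [s] [s] p hp
  have hpw : (pvLevels g md.toNat 0 [s] [s]).Pairwise (fun p q => p.1 < q.1) :=
    pvLevels_fst_pairwise g md.toNat 0 [s] [s]
  have hpwne : (pvLevels g md.toNat 0 [s] [s]).Pairwise (fun p q => p.1 ≠ q.1) :=
    hpw.imp (fun h => ne_of_lt h)
  have hne : ∀ p ∈ pvLevels g md.toNat 0 [s] [s], p.2 ≠ [] :=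
    fun p hp => pvLevels_snd_ne_nil g md.toNat 0 [s] [s] p hp
  -- ===== A side =====
  have hloop : pvLoopA g md.toNat 1 [s] (PySem.Dict.mk [((0 : Int), [s])]) [s]
      = pvLoopA g md.toNat ((0 : Int) + 1) [s] (PySem.Dict.mk [((0 : Int), [s])]) [s] := by
    norm_num
  rw [hV, hloop, pvLoopA_levels g md.toNat 0 [s] (PySem.Dict.mk [((0 : Int), [s])]) [s]]
  have hfresh : ∀ p ∈ pvLevels g md.toNat 0 [s] [s],
      (PySem.Dict.mk [((0 : Int), [s])]).contains p.1 = false := by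
    intro p hp
    have h0 := hlt p hp
    simp [PySem.Dict.contains_mk]
    omega
  have hnd : ((pvLevels g md.toNat 0 [s] [s]).map (fun p => p.1)).Nodup :=
    List.pairwise_map.2 hpwne
  have hAitems := PySem.Dict.items_foldl_insert_fresh (pvLevels g md.toNat 0 [s] [s])
    (fun p => p.1) (fun p => PySem.List.sorted p.2 (fun x => x) false)
    (PySem.Dict.mk [((0 : Int), [s])]) hfresh hnd
  rw [hAitems]
  -- ===== B side =====
  have hc0 : pvCouple (PySem.Dict.mk [(s, (0 : Int))]) [s] := by
    intro x
    rw [PySem.Dict.contains_mk]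
    constructor
    · intro hx; simp at hx; simp [hx]
    · intro hx; simp at hx; simp [hx]
  have hfuel0 : ([s] : List String).length + pvPot g (PySem.Dict.mk [(s, (0 : Int))])
      ≤ (g.map (fun p => p.2.length)).sum + 1 := by
    have h1 : pvPot g (PySem.Dict.mk [(s, (0 : Int))]) ≤ (pvCands g).length :=
      List.length_filter_le _ _
    have h2 : (pvCands g).length = (g.map (fun p => p.2.length)).sum := by
      simp [pvCands, List.length_flatMap]
    simp only [List.length_cons, List.length_nil]
    omega
  have hq0 : [((s : String), (0 : Int))] = ([s] : List String).map (fun x => (x, (0 : Int))) := by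
    simp
  have hdist := pvBfs_main g md md.toNat 0 [s] [s] (PySem.Dict.mk [(s, (0 : Int))])
    ((g.map (fun p => p.2.length)).sum + 1) hc0 (by omega) hfuel0
  rw [← hq0] at hdist
  rw [hdist]
  -- the dist items, swapped for the bucketing loop
  have hswap : ∀ (I : List (String × Int)),
      I.foldl (fun b p => b.modify p.2 [] (fun l => l ++ [p.1])) PySem.Dict.empty
      = (I.map (fun p => (p.2, p.1))).foldl
          (fun b p => b.modify p.1 [] (fun l => l ++ [p.2])) PySem.Dict.empty := by
    intro I
    rw [List.foldl_map]
  set I : List (String × Int) :=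
    (s, 0) :: (pvLevels g md.toNat 0 [s] [s]).flatMap (fun p => p.2.map (fun x => (x, p.1)))
    with hIdef
  have hIeq : ((PySem.Dict.mk [(s, (0 : Int))]).items
      ++ (pvLevels g md.toNat 0 [s] [s]).flatMap (fun p => p.2.map (fun x => (x, p.1)))) = I := by
    simp [hIdef]
  rw [hIeq]
  -- swapped item list
  have hS : I.map (fun p => (p.2, p.1))
      = ((0 : Int), s) :: (pvLevels g md.toNat 0 [s] [s]).flatMap
          (fun p => p.2.map (fun x => (p.1, x))) := by
    simp [hIdef, List.map_flatMap, Function.comp_def]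
  -- keys of the buckets dict
  have hkeys : (I.foldl (fun b p => b.modify p.2 [] (fun l => l ++ [p.1])) PySem.Dict.empty).keys
      = 0 :: (pvLevels g md.toNat 0 [s] [s]).map (fun p => p.1) := by
    have h1 := PySem.Dict.keys_foldl_modify_key I (fun p => p.2) []
      (fun b p => fun l => l ++ [p.1]) PySem.Dict.empty
    rw [h1]
    have h2 : I.map (fun p => p.2)
        = 0 :: (pvLevels g md.toNat 0 [s] [s]).flatMap (fun p => p.2.map (fun _ => p.1)) := by
      simp [hIdef, List.map_flatMap, Function.comp_def]
    rw [h2]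
    show PySem.Set.update [] _ = _
    have h3 : PySem.Set.update ([] : List Int)
        (0 :: (pvLevels g md.toNat 0 [s] [s]).flatMap (fun p => p.2.map (fun _ => p.1)))
        = ((pvLevels g md.toNat 0 [s] [s]).flatMap (fun p => p.2.map (fun _ => p.1))).foldl
            PySem.Set.add [(0 : Int)] := by
      rfl
    rw [h3, pvOfList_groups (pvLevels g md.toNat 0 [s] [s]) [(0 : Int)] hne
      (fun p hp => by simpa using (ne_of_gt (hlt p hp))) hpwne]
    rfl
  rw [hkeys]
  -- sorted keys are already increasing
  have hsortK : PySem.List.sorted (0 :: (pvLevels g md.toNat 0 [s] [s]).map (fun p => p.1))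
      (fun x => x) false = 0 :: (pvLevels g md.toNat 0 [s] [s]).map (fun p => p.1) := by
    apply PySem.List.sorted_eq_self_of_pairwise
    refine List.pairwise_cons.2 ⟨?_, ?_⟩
    · intro k hk
      obtain ⟨p, hp, rfl⟩ := List.mem_map.1 hk
      exact le_of_lt (hlt p hp)
    · exact List.pairwise_map.2 (hpw.imp (fun h => le_of_lt h))
  rw [hsortK]
  -- the bucket lists
  have hgetD : ∀ c : Int,
      (I.foldl (fun b p => b.modify p.2 [] (fun l => l ++ [p.1])) PySem.Dict.empty).getD c []
      = ((I.map (fun p => (p.2, p.1))).filter (fun q => q.1 == c)).map (fun q => q.2) := by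
    intro c
    rw [hswap I, PySem.Dict.getD_foldl_modify_append]
    rfl
  have hget0 : (I.foldl (fun b p => b.modify p.2 [] (fun l => l ++ [p.1]))
      PySem.Dict.empty).getD 0 [] = [s] := by
    rw [hgetD 0, hS]
    rw [List.filter_cons_of_pos (by simp)]
    rw [pvFilter_flat_nil (pvLevels g md.toNat 0 [s] [s]) 0
      (fun p hp => ne_of_gt (hlt p hp))]
    simp
  have hgetp : ∀ p ∈ pvLevels g md.toNat 0 [s] [s],
      (I.foldl (fun b p => b.modify p.2 [] (fun l => l ++ [p.1]))
        PySem.Dict.empty).getD p.1 [] = p.2 := by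
    intro p hp
    rw [hgetD p.1, hS]
    rw [List.filter_cons_of_neg (by simpa using (ne_of_lt (hlt p hp)))]
    rw [pvFilter_flat_group (pvLevels g md.toNat 0 [s] [s]) hpwne p hp]
    simp
  -- assemble
  rw [List.map_cons, hget0, List.map_map]
  rw [List.map_congr_left (l := pvLevels g md.toNat 0 [s] [s])
    (f := (fun d => (d, PySem.List.sorted
      ((I.foldl (fun b p => b.modify p.2 [] (fun l => l ++ [p.1]))
        PySem.Dict.empty).getD d []) (fun x => x) false)) ∘ (fun p => p.1))
    (g := fun p => (p.1, PySem.List.sorted p.2 (fun x => x) false))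
    (fun p hp => by simp [Function.comp_def, hgetp p hp])]
  simp
  rfl
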